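-- pv_equiv track=rewrite | github.com/Txrxaxixnx/COOSALUD_EVARISIS | notion_control_interno.py | _parsear_grupos_por_usuario
-- ===== SOURCE A (Python) =====
-- def _parsear_grupos_por_usuario(texto, marca):
--     # (Lógica de parseo no cambia, es interna y no necesita logging)
--     lineas = texto.split("\n")
--     idx_inicio = 0
--     if lineas and lineas[0].startswith(marca):
--         idx_inicio = 1
--         while idx_inicio < len(lineas) and not lineas[idx_inicio].strip():
--             idx_inicio += 1
--
--     lineas_contenido = lineas[idx_inicio:]
--     grupos, tmp = [], []
--     for ln in lineas_contenido:
--         if ln.startswith("Usuario: "):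
--             if tmp:
--                 while tmp and not tmp[-1].strip(): tmp.pop()
--                 grupos.append(tmp)
--             tmp = [ln]
--         else:
--             tmp.append(ln)
--     if tmp:
--         while tmp and not tmp[-1].strip(): tmp.pop()
--         if tmp: grupos.append(tmp)
--     return grupos
-- ===== SOURCE B (Python) =====
-- def _parsear_grupos_por_usuario(texto, marca):
--     lineas = texto.split("\n")
--     if lineas and lineas[0].startswith(marca):
--         lineas = lineas[1:]
--         while lineas and not lineas[0].strip():
--             lineas = lineas[1:]
--     cortes = [i for i, ln in enumerate(lineas) if ln.startswith("Usuario: ")]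
--     limites = [0] + cortes + [len(lineas)]
--     grupos = []
--     for a, b in zip(limites, limites[1:]):
--         seg = lineas[a:b]
--         n = len(seg)
--         while n > 0 and not seg[n - 1].strip():
--             n -= 1
--         if n > 0:
--             grupos.append(seg[:n])
--     return grupos
-- ===== Notes on version B (the rewrite author's own statement) =====
-- stated objective: alternative
-- what changed: Replaces A's single forward accumulator loop (flushing and trimming the current group at each 'Usuario: ' marker, with an asymmetric last-group rule) by index-based cutting: collect the marker positions, cut the content at those boundaries, then trim every segment uniformly and keep the non-empty ones.
-- intended difference: On inputs whose content (after the header-skip rule) opens with a non-empty run of blank lines followed somewhere by a 'Usuario: ' line, A returns a leading empty group [] (the blank preamble trimmed away to nothing) while B omits it; a list of user groups should not contain an empty group, so B's value is the intended one. — e.g. on _parsear_grupos_por_usuario("\nUsuario: a", "x"): A returns [[], ["Usuario: a"]], B returns [["Usuario: a"]]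
import Mathlib
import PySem

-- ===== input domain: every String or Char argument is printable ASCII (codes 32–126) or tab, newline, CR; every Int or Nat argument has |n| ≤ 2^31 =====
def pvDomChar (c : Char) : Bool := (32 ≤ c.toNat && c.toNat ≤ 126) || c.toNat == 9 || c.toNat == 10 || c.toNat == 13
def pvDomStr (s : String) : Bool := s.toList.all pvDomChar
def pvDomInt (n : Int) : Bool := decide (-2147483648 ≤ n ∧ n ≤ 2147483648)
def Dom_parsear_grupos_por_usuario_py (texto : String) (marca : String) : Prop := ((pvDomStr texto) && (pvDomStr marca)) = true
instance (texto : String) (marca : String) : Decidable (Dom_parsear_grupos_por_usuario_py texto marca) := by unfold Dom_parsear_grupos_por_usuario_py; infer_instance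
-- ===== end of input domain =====

-- B cuts the content at the indices of the 'Usuario: ' lines and trims each segment
-- uniformly (objective: alternative decomposition, same cost); where the content opens
-- with blank lines followed by a marker, A returns a leading empty group and B omits it
-- (stated as the intended difference D_ below).

def pvBlankB (s : String) : Bool := PySem.Str.strip s == ""
def pvMarker (s : String) : Bool := PySem.Str.startswith s "Usuario: "

-- ===== PORT A =====
-- while tmp and not tmp[-1].strip(): tmp.pop()   (structural recursion over tmp)
def pvPopTrailingA : List String → List String
  | [] => []
  | l :: rest =>
      let r := pvPopTrailingA rest
      if r.isEmpty && pvBlankB l then [] else l :: r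

-- the for-loop over lineas_contenido with state (grupos, tmp)
def pvLoopA : List String → List (List String) → List String → List (List String)
  | [], grupos, tmp =>
      if !tmp.isEmpty then
        let t := pvPopTrailingA tmp
        if !t.isEmpty then grupos ++ [t] else grupos
      else grupos
  | ln :: rest, grupos, tmp =>
      if PySem.Str.startswith ln "Usuario: " then
        if !tmp.isEmpty then pvLoopA rest (grupos ++ [pvPopTrailingA tmp]) [ln]
        else pvLoopA rest grupos [ln]
      else pvLoopA rest grupos (tmp ++ [ln])

-- the idx_inicio while-loop: advance past blank lines
def pvSkipBlanksA : List String → List String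
  | [] => []
  | l :: rest => if pvBlankB l then pvSkipBlanksA rest else l :: rest

def parsear_grupos_por_usuario_py (texto : String) (marca : String) : List (List String) :=
  let lineas := (PySem.Str.split? texto "\n").getD []
  let contenido :=
    if !lineas.isEmpty && PySem.Str.startswith lineas.headI marca then
      pvSkipBlanksA (lineas.drop 1)
    else lineas
  pvLoopA contenido [] []

-- ===== PORT B =====
-- n = len(seg); while n > 0 and not seg[n-1].strip(): n -= 1   (countdown on n)
def pvTrimLenB (seg : List String) : Nat → Nat
  | 0 => 0
  | n + 1 => if pvBlankB (seg.getD n "") then pvTrimLenB seg n else n + 1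

def parsear_grupos_por_usuario_py_alt (texto : String) (marca : String) : List (List String) :=
  let lineas := (PySem.Str.split? texto "\n").getD []
  let lineas :=
    if !lineas.isEmpty && PySem.Str.startswith lineas.headI marca then
      List.dropWhile pvBlankB (lineas.drop 1)
    else lineas
  let cortes := ((PySem.List.enumerate lineas).filter
      (fun p => PySem.Str.startswith p.2 "Usuario: ")).map Prod.fst
  let limites := ((0 : Int) :: cortes) ++ [(lineas.length : Int)]
  (limites.zip limites.tail).foldl
    (fun grupos ab =>
      let seg := PySem.List.slice lineas (some ab.1) (some ab.2)
      let n := pvTrimLenB seg seg.length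
      if 0 < n then grupos ++ [PySem.List.slice seg none (some (n : Int))] else grupos)
    []

-- ===== PRECONDITION & SPEC =====
-- On inputs whose lines do not open with the marca header and start with a non-empty run
-- of blank lines followed somewhere by a 'Usuario: ' line, A returns a leading empty
-- group [] (the blank preamble trimmed away to nothing) while B omits it; a list of user
-- groups should not contain an empty group, so B's value is the intended one.
def D_parsear_grupos_por_usuario_py (texto : String) (marca : String) : Prop :=
  let ls := (PySem.Str.split? texto "\n").getD []
  let pre := ls.takeWhile (fun l => !pvMarker l)
  ¬ (ls ≠ [] ∧ PySem.Str.startswith ls.headI marca = true) ∧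
  pre ≠ [] ∧ (∀ l ∈ pre, pvBlankB l = true) ∧ pre.length < ls.length
instance (texto : String) (marca : String) : Decidable (D_parsear_grupos_por_usuario_py texto marca) := by unfold D_parsear_grupos_por_usuario_py; infer_instance

def Spec_parsear_grupos_por_usuario_py (texto : String) (marca : String) (out : List (List String)) : Prop := ¬ D_parsear_grupos_por_usuario_py texto marca → out = parsear_grupos_por_usuario_py_alt texto marca
instance (texto : String) (marca : String) (out : List (List String)) : Decidable (Spec_parsear_grupos_por_usuario_py texto marca out) := by unfold Spec_parsear_grupos_por_usuario_py; infer_instance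

def pvDiffWitness_parsear_grupos_por_usuario_py : String × String := ("\nUsuario: a", "x")
def pvDiffWitnessOut_parsear_grupos_por_usuario_py : (List (List String)) × (List (List String)) :=
  ([[], ["Usuario: a"]], [["Usuario: a"]])

-- ===== CLAIM =====
def Claim_unchanged_parsear_grupos_por_usuario_py : Prop := ∀ (texto : String) (marca : String), Dom_parsear_grupos_por_usuario_py texto marca → Spec_parsear_grupos_por_usuario_py texto marca (parsear_grupos_por_usuario_py texto marca)
def Claim_changed_parsear_grupos_por_usuario_py : Prop := Dom_parsear_grupos_por_usuario_py (pvDiffWitness_parsear_grupos_por_usuario_py.1) (pvDiffWitness_parsear_grupos_por_usuario_py.2) ∧ D_parsear_grupos_por_usuario_py (pvDiffWitness_parsear_grupos_por_usuario_py.1) (pvDiffWitness_parsear_grupos_por_usuario_py.2) ∧ parsear_grupos_por_usuario_py (pvDiffWitness_parsear_grupos_por_usuario_py.1) (pvDiffWitness_parsear_grupos_por_usuario_py.2) = pvDiffWitnessOut_parsear_grupos_por_usuario_py.1 ∧ parsear_grupos_por_usuario_py_alt (pvDiffWitness_parsear_grupos_por_usuario_py.1) (pvDiffWitness_parsear_grupos_por_usuario_py.2)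 = pvDiffWitnessOut_parsear_grupos_por_usuario_py.2 ∧ pvDiffWitnessOut_parsear_grupos_por_usuario_py.1 ≠ pvDiffWitnessOut_parsear_grupos_por_usuario_py.2
def Claim_exact_parsear_grupos_por_usuario_py : Prop := ∀ (texto : String) (marca : String), Dom_parsear_grupos_por_usuario_py texto marca → D_parsear_grupos_por_usuario_py texto marca → parsear_grupos_por_usuario_py texto marca ≠ parsear_grupos_por_usuario_py_alt texto marca

-- ===== LEMMAS AND PROOFS =====

-- the content lines after the header-skip rule (proof-side abbreviation)
def pvContenido (texto : String) (marca : String) : List String :=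
  let lineas := (PySem.Str.split? texto "\n").getD []
  if !lineas.isEmpty && PySem.Str.startswith lineas.headI marca then
    List.dropWhile pvBlankB (lineas.drop 1)
  else lineas

def pvRtrim (seg : List String) : List String :=
  (List.dropWhile pvBlankB seg.reverse).reverse

-- the segmentation both programs induce, read off backwards
def pvSegStep (ln : String) (st : List String × List (List String)) :
    List String × List (List String) :=
  if pvMarker ln then ([], (ln :: st.1) :: st.2)
  else (ln :: st.1, st.2)

def pvSegs (ls : List String) : List (List String) :=
  let st := ls.foldr pvSegStep ([], [])
  st.1 :: st.2

-- A's collection rule: every segment but the last appended (trimmed) when non-empty,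
-- the last one only when non-empty after trimming
def pvCollectA : List (List String) → List (List String)
  | [] => []
  | [seg] =>
      if seg.isEmpty then []
      else (let t := pvRtrim seg; if t.isEmpty then [] else [t])
  | seg :: rest =>
      (if seg.isEmpty then [] else [pvRtrim seg]) ++ pvCollectA rest

-- B's collection rule: trim every segment, keep the non-empty ones
def pvCollectB (segs : List (List String)) : List (List String) :=
  (segs.filter (fun s => !(pvRtrim s).isEmpty)).map pvRtrim

-- Nat mirror of B's cortes/limites index scaffolding
def pvCortesN : List String → List Nat
  | [] => []
  | ln :: rest => (if pvMarker ln then [0] else []) ++ (pvCortesN rest).map (· + 1)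

def pvLimsN (ls : List String) : List Nat := (0 :: pvCortesN ls) ++ [ls.length]

def pvPairs {α : Type} (L : List α) : List (α × α) := L.zip L.tail

def pvSegN (ls : List String) (ab : Nat × Nat) : List String :=
  (ls.drop ab.1).take (ab.2 - ab.1)

-- ---------- shared small lemmas ----------

theorem pvSkipBlanksA_eq_dropWhile (ls : List String) :
    pvSkipBlanksA ls = List.dropWhile pvBlankB ls := by
  induction ls with
  | nil => rfl
  | cons l rest ih =>
      simp only [pvSkipBlanksA, List.dropWhile]
      split_ifs with h
      · simpa [h] using ih
      · simp [h]

theorem pvPopTrailingA_eq_rtrim (ls : List String) :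
    pvPopTrailingA ls = pvRtrim ls := by
  induction ls with
  | nil => rfl
  | cons l rest ih =>
      simp only [pvPopTrailingA, pvRtrim, List.reverse_cons, List.dropWhile_append, ih]
      by_cases h : (List.dropWhile pvBlankB rest.reverse).isEmpty
      · by_cases hb : pvBlankB l
        · simp [h, List.dropWhile, hb]
        · have h' : ∀ x ∈ rest, pvBlankB x := by
            simpa [List.isEmpty_iff, List.dropWhile_eq_nil_iff] using h
          simp [h, List.dropWhile, hb]
          exact fun x hx => h' x hx
      · simp [h]

theorem pvRtrim_nil_iff (ls : List String) :
    pvRtrim ls = [] ↔ ∀ l ∈ ls, pvBlankB l = true := by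
  simp [pvRtrim, List.dropWhile_eq_nil_iff]

theorem pvRtrim_cons_ne_nil (m : String) (t : List String) (hm : pvBlankB m = false) :
    pvRtrim (m :: t) ≠ [] := by
  intro h
  rw [pvRtrim_nil_iff] at h
  have := h m (by simp)
  rw [hm] at this
  exact Bool.false_ne_true this

theorem pvMarker_not_blank (m : String) (hm : pvMarker m = true) : pvBlankB m = false := by
  by_contra h
  have hb : pvBlankB m = true := by
    cases hb' : pvBlankB m
    · exact absurd hb' h
    · rfl
  have hstrip : PySem.Str.strip m = "" := by simpa [pvBlankB] using hb
  have hpref : "Usuario: ".toList <+: m.toList := by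
    have := (PySem.Chars.startswith_iff m.toList "Usuario: ".toList).mp (by simpa [pvMarker] using hm)
    exact this
  have hU : 'U' ∈ m.toList := hpref.subset (by decide)
  have hc : PySem.Chars.strip m.toList = [] := by
    have := congrArg String.toList hstrip
    simpa using this
  simp only [PySem.Chars.strip, PySem.Chars.rstrip, PySem.Chars.lstrip,
    List.reverse_eq_nil_iff, List.dropWhile_eq_nil_iff, List.mem_reverse] at hc
  have hU' : 'U' ∈ List.dropWhile PySem.Chars.isspace m.toList := by
    have hsplit := List.takeWhile_append_dropWhile (p := PySem.Chars.isspace) (l := m.toList)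
    rcases List.mem_append.mp (by rw [hsplit]; exact hU) with h1 | h1
    · have := List.mem_takeWhile_imp h1
      exact absurd this (by decide)
    · exact h1
  have := hc 'U' hU'
  exact absurd this (by decide)

-- ---------- A-side characterization ----------

theorem pvLoopA_acc (ls : List String) :
    ∀ (grupos : List (List String)) (tmp : List String),
      pvLoopA ls grupos tmp = grupos ++ pvLoopA ls [] tmp := by
  induction ls with
  | nil =>
      intro grupos tmp
      simp only [pvLoopA]
      split_ifs <;> simp
  | cons ln rest ih =>
      intro grupos tmp
      simp only [pvLoopA, List.nil_append]
      split_ifs with h1 h2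
      · rw [ih (grupos ++ [pvPopTrailingA tmp]) [ln], ih [pvPopTrailingA tmp] [ln],
          List.append_assoc]
      · exact ih grupos [ln]
      · exact ih grupos (tmp ++ [ln])

theorem pvCollectA_cons_cons (seg s2 : List String) (rest : List (List String))
    (htmp : seg ≠ []) :
    pvCollectA (seg :: s2 :: rest) = pvRtrim seg :: pvCollectA (s2 :: rest) := by
  simp [pvCollectA, htmp]

theorem pvLoopA_main (ls : List String) :
    ∀ (tmp : List String), tmp ≠ [] →
      pvLoopA ls [] tmp =
        pvCollectA ((tmp ++ (ls.foldr pvSegStep ([], [])).1) :: (ls.foldr pvSegStep ([], [])).2) := by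
  induction ls with
  | nil =>
      intro tmp htmp
      simp only [pvLoopA, List.foldr, List.append_nil, pvCollectA]
      rw [pvPopTrailingA_eq_rtrim]
      simp [htmp]
  | cons ln rest ih =>
      intro tmp htmp
      simp only [pvLoopA, List.foldr, pvSegStep, pvMarker]
      by_cases hm : PySem.Str.startswith ln "Usuario: "
      · rw [if_pos hm, if_pos (by simp [htmp]), if_pos hm]
        rw [pvLoopA_acc, ih [ln] (by simp), List.append_nil,
          pvCollectA_cons_cons _ _ _ htmp, pvPopTrailingA_eq_rtrim]
        simp
      · rw [if_neg hm, if_neg hm, ih (tmp ++ [ln]) (by simp)]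
        simp

theorem pvLoopA_top (ls : List String) :
    pvLoopA ls [] [] = pvCollectA (pvSegs ls) := by
  cases ls with
  | nil => rfl
  | cons ln rest =>
      simp only [pvLoopA, pvSegs, List.foldr, pvSegStep, pvMarker, List.isEmpty_nil,
        Bool.not_true, List.nil_append]
      by_cases hm : PySem.Str.startswith ln "Usuario: "
      · rw [if_pos hm, if_pos hm, if_neg (by simp), pvLoopA_main rest [ln] (by simp)]
        simp [pvCollectA]
      · rw [if_neg hm, if_neg hm, pvLoopA_main rest [ln] (by simp)]
        simp

theorem portA_char (texto marca : String) :
    parsear_grupos_por_usuario_py texto marca = pvCollectA (pvSegs (pvContenido texto marca)) := by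
  unfold parsear_grupos_por_usuario_py pvContenido
  simp only [pvSkipBlanksA_eq_dropWhile]
  split_ifs <;> exact pvLoopA_top _

-- ---------- segment structure lemmas ----------

theorem pvSegs_pre (ls : List String) :
    (ls.foldr pvSegStep ([], [])).1 = ls.takeWhile (fun l => !pvMarker l) := by
  induction ls with
  | nil => rfl
  | cons ln rest ih =>
      simp only [List.foldr, pvSegStep, List.takeWhile]
      by_cases hm : pvMarker ln <;> simp [hm, ih]

theorem pvSegs_nil_iff (ls : List String) :
    (ls.foldr pvSegStep ([], [])).2 = [] ↔ ∀ l ∈ ls, pvMarker l = false := by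
  induction ls with
  | nil => simp
  | cons ln rest ih =>
      simp only [List.foldr, pvSegStep]
      by_cases hm : pvMarker ln <;> simp [hm, ih]

theorem pvSegs_inv (ls : List String) :
    ∀ s ∈ (ls.foldr pvSegStep ([], [])).2, ∃ m t, s = m :: t ∧ pvMarker m = true := by
  induction ls with
  | nil => simp
  | cons ln rest ih =>
      simp only [List.foldr, pvSegStep]
      by_cases hm : pvMarker ln
      · simp only [hm, if_pos]
        intro s hs
        rcases List.mem_cons.mp hs with h | h
        · exact ⟨ln, (rest.foldr pvSegStep ([], [])).1, h, hm⟩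
        · exact ih s h
      · simpa [hm] using ih

theorem pvTakeWhile_lt_of_segs_ne_nil (C : List String)
    (h : (C.foldr pvSegStep ([], [])).2 ≠ []) :
    (C.takeWhile (fun l => !pvMarker l)).length < C.length := by
  obtain ⟨m, hmC, hm⟩ : ∃ m ∈ C, pvMarker m = true := by
    by_contra hc
    push Not at hc
    exact h ((pvSegs_nil_iff C).mpr (fun l hl => by
      cases hml : pvMarker l
      · rfl
      · exact absurd hml (hc l hl)))
  have hpref := List.takeWhile_prefix (l := C) (p := fun l => !pvMarker l)
  have hle := hpref.length_le
  rcases Nat.lt_or_ge (C.takeWhile (fun l => !pvMarker l)).length C.length with hlt | hge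
  · exact hlt
  · exfalso
    have heq : C.takeWhile (fun l => !pvMarker l) = C := hpref.eq_of_length (by omega)
    have h2 : pvMarker m = false := by
      simpa using List.mem_takeWhile_imp (l := C) (p := fun l => !pvMarker l) (by rw [heq]; exact hmC)
    rw [hm] at h2
    exact absurd h2 (by decide)

theorem pvSegs_ne_nil_of_lt (C : List String)
    (h : (C.takeWhile (fun l => !pvMarker l)).length < C.length) :
    (C.foldr pvSegStep ([], [])).2 ≠ [] := by
  intro h0
  have hall := (pvSegs_nil_iff C).mp h0
  have heq : C.takeWhile (fun l => !pvMarker l) = C :=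
    List.takeWhile_eq_self_iff.mpr fun l hl => by simp [hall l hl]
  rw [heq] at h
  omega

-- ---------- B-side: trimming ----------

theorem pvTrimLenB_le (seg : List String) (n : Nat) : pvTrimLenB seg n ≤ n := by
  induction n with
  | zero => simp [pvTrimLenB]
  | succ n ih => simp only [pvTrimLenB]; split_ifs <;> omega

theorem pvTrimLenB_append (xs : List String) (x : String) :
    ∀ n, n ≤ xs.length → pvTrimLenB (xs ++ [x]) n = pvTrimLenB xs n := by
  intro n
  induction n with
  | zero => intro _; rfl
  | succ n ih =>
      intro h
      have hg : (xs ++ [x]).getD n "" = xs.getD n "" := by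
        have hn : n < xs.length := by omega
        simp [List.getD, List.getElem?_append_left hn]
      simp only [pvTrimLenB, hg]
      split_ifs with hb
      · exact ih (by omega)
      · rfl

theorem pvTake_trimLen (seg : List String) :
    seg.take (pvTrimLenB seg seg.length) = pvRtrim seg := by
  induction seg using List.reverseRecOn with
  | nil => rfl
  | append_singleton xs x ih =>
      have hlen : (xs ++ [x]).length = xs.length + 1 := by simp
      rw [hlen]
      simp only [pvTrimLenB]
      have hg : (xs ++ [x]).getD xs.length "" = x := by
        simp [List.getD]
      rw [hg]
      by_cases hb : pvBlankB x
      · rw [if_pos hb, pvTrimLenB_append xs x xs.length le_rfl]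
        have hle : pvTrimLenB xs xs.length ≤ xs.length := pvTrimLenB_le _ _
        rw [List.take_append_of_le_length hle, ih]
        simp [pvRtrim, hb]
      · rw [if_neg hb]
        have hfull : (xs ++ [x]).take (xs.length + 1) = xs ++ [x] := by
          apply List.take_of_length_le; simp
        rw [hfull]
        simp [pvRtrim, hb]

theorem pvTrim_slice_eq (seg : List String) :
    PySem.List.slice seg none (some ((pvTrimLenB seg seg.length : Nat) : Int)) = pvRtrim seg := by
  rw [PySem.List.slice_to_natCast, pvTake_trimLen]

theorem pvTrimLen_pos_iff (seg : List String) :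
    (0 < pvTrimLenB seg seg.length) ↔ ¬ (pvRtrim seg).isEmpty = true := by
  constructor
  · intro h he
    have ht := pvTake_trimLen seg
    rw [List.isEmpty_iff] at he
    rw [he, List.take_eq_nil_iff] at ht
    rcases ht with h0 | h0
    · omega
    · subst h0; simp [pvTrimLenB] at h
  · intro h
    by_contra h0
    have hz : pvTrimLenB seg seg.length = 0 := by omega
    have ht := pvTake_trimLen seg
    rw [hz] at ht
    simp only [List.take_zero] at ht
    rw [← ht] at h
    simp at h

-- ---------- B-side: segmentation by indices ----------

theorem pvCortes_enum (ls : List String) :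
    ∀ (s : Int),
      (((PySem.List.enumerate ls s).filter (fun p => PySem.Str.startswith p.2 "Usuario: ")).map Prod.fst)
        = (pvCortesN ls).map (fun n : Nat => (n : Int) + s) := by
  induction ls with
  | nil => intro s; rfl
  | cons ln rest ih =>
      intro s
      rw [PySem.List.enumerate_cons, List.filter_cons]
      by_cases hm : pvMarker ln
      · rw [if_pos (by simpa [pvMarker] using hm)]
        rw [List.map_cons, ih (s + 1)]
        have hc : pvCortesN (ln :: rest) = 0 :: (pvCortesN rest).map (· + 1) := by
          simp [pvCortesN, hm]
        rw [hc, List.map_cons, List.map_map]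
        congr 1
        · simp
        · apply List.map_congr_left; intro n _
          simp only [Function.comp]
          push_cast; ring
      · rw [if_neg (by simpa [pvMarker] using hm)]
        rw [ih (s + 1)]
        have hc : pvCortesN (ln :: rest) = (pvCortesN rest).map (· + 1) := by
          simp [pvCortesN, hm]
        rw [hc, List.map_map]
        apply List.map_congr_left; intro n _
        simp only [Function.comp]
        push_cast; ring

theorem pvPairs_cons₂ {α : Type} (a b : α) (t : List α) :
    pvPairs (a :: b :: t) = (a, b) :: pvPairs (b :: t) := rfl

theorem pvPairs_map {α β : Type} (f : α → β) (L : List α) :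
    pvPairs (L.map f) = (pvPairs L).map (fun ab => (f ab.1, f ab.2)) := by
  cases L with
  | nil => rfl
  | cons a t =>
      show (List.map f (a :: t)).zip ((List.map f (a :: t)).tail) = _
      rw [show (List.map f (a :: t)).tail = List.map f t from rfl,
        show pvPairs (a :: t) = (a :: t).zip t from rfl, List.zip_map]
      apply List.map_congr_left; intro ab _; cases ab; rfl

theorem pvSegN_shift (ln : String) (rest : List String) (ab : Nat × Nat) :
    pvSegN (ln :: rest) (ab.1 + 1, ab.2 + 1) = pvSegN rest ab := by
  simp [pvSegN, Nat.succ_sub_succ]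

theorem pvSegsIdx_eq (ls : List String) :
    (pvPairs (pvLimsN ls)).map (pvSegN ls) = pvSegs ls := by
  induction ls with
  | nil => rfl
  | cons ln rest ih =>
      obtain ⟨t, T', hT⟩ : ∃ t T', pvCortesN rest ++ [rest.length] = t :: T' := by
        cases h : pvCortesN rest ++ [rest.length] with
        | nil => exact absurd h (by simp)
        | cons a b => exact ⟨a, b, rfl⟩
      have hlims : pvLimsN rest = 0 :: t :: T' := by
        simp only [pvLimsN, List.cons_append, hT]
      have hIH := ih
      rw [hlims, pvPairs_cons₂, List.map_cons] at hIH
      simp only [pvSegs] at hIH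
      have hpre1 : pvSegN rest (0, t) = (rest.foldr pvSegStep ([], [])).1 := by
        injection hIH
      have hpre2 : (pvPairs (t :: T')).map (pvSegN rest) = (rest.foldr pvSegStep ([], [])).2 := by
        injection hIH
      have hmapT : (pvPairs ((t + 1) :: List.map (· + 1) T')).map (pvSegN (ln :: rest))
          = (pvPairs (t :: T')).map (pvSegN rest) := by
        have hcons : (t + 1) :: List.map (· + 1) T' = List.map (· + 1) (t :: T') := by
          simp
        rw [hcons, pvPairs_map, List.map_map]
        apply List.map_congr_left; intro ab _
        exact pvSegN_shift ln rest ab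
      have hseg1 : pvSegN (ln :: rest) (0, t + 1) = ln :: pvSegN rest (0, t) := by
        simp [pvSegN]
      have h1 : (pvCortesN rest).map (· + 1) ++ [rest.length + 1]
          = (t + 1) :: List.map (· + 1) T' := by
        rw [show (pvCortesN rest).map (· + 1) ++ [rest.length + 1]
            = List.map (· + 1) (pvCortesN rest ++ [rest.length]) from by simp, hT]
        rfl
      by_cases hm : pvMarker ln
      · have hlims' : pvLimsN (ln :: rest) = 0 :: 0 :: (t + 1) :: List.map (· + 1) T' := by
          have hshape : pvLimsN (ln :: rest)
              = 0 :: 0 :: ((pvCortesN rest).map (· + 1) ++ [rest.length + 1]) := by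
            simp [pvLimsN, pvCortesN, hm]
          rw [hshape, h1]
        rw [hlims', pvPairs_cons₂, List.map_cons, pvPairs_cons₂, List.map_cons,
          hmapT, hpre2, hseg1, hpre1]
        simp [pvSegs, pvSegStep, hm, pvSegN]
      · have hlims' : pvLimsN (ln :: rest) = 0 :: (t + 1) :: List.map (· + 1) T' := by
          have hshape : pvLimsN (ln :: rest)
              = 0 :: ((pvCortesN rest).map (· + 1) ++ [rest.length + 1]) := by
            simp [pvLimsN, pvCortesN, hm]
          rw [hshape, h1]
        rw [hlims', pvPairs_cons₂, List.map_cons, hmapT, hpre2, hseg1, hpre1]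
        simp [pvSegs, pvSegStep, hm]

-- ---------- B-side characterization ----------

theorem pvCollectB_cons (x : List String) (l : List (List String)) :
    pvCollectB (x :: l)
      = (if (pvRtrim x).isEmpty then [] else [pvRtrim x]) ++ pvCollectB l := by
  simp only [pvCollectB, List.filter_cons]
  by_cases h : (pvRtrim x).isEmpty <;> simp [h]

theorem pvFoldB_collect {α : Type} (g : α → List String) (L : List α) :
    ∀ (acc : List (List String)),
      L.foldl (fun grupos ab =>
        if 0 < pvTrimLenB (g ab) (g ab).length then
          grupos ++ [PySem.List.slice (g ab) none (some ((pvTrimLenB (g ab) (g ab).length : Nat) : Int))]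
        else grupos) acc
      = acc ++ pvCollectB (L.map g) := by
  induction L with
  | nil => intro acc; simp [pvCollectB]
  | cons a l ih =>
      intro acc
      rw [List.foldl_cons, List.map_cons, pvCollectB_cons]
      by_cases h : 0 < pvTrimLenB (g a) (g a).length
      · rw [if_pos h, ih, pvTrim_slice_eq]
        have hne : ¬ (pvRtrim (g a)).isEmpty = true := (pvTrimLen_pos_iff (g a)).mp h
        simp [hne]
      · rw [if_neg h, ih]
        have he : (pvRtrim (g a)).isEmpty = true := by
          by_contra hc
          exact h ((pvTrimLen_pos_iff (g a)).mpr hc)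
        simp [he]

theorem pvLimites_eq (C : List String) :
    ((0 : Int) :: ((PySem.List.enumerate C).filter
        (fun p => PySem.Str.startswith p.2 "Usuario: ")).map Prod.fst) ++ [(C.length : Int)]
      = (pvLimsN C).map (fun n : Nat => (n : Int)) := by
  rw [show (PySem.List.enumerate C) = PySem.List.enumerate C 0 from rfl, pvCortes_enum C 0]
  rw [show pvLimsN C = (0 :: pvCortesN C) ++ [C.length] from rfl]
  rw [List.map_append, List.map_cons]
  simp

theorem pvMappedSegs (C : List String) :
    (pvPairs ((pvLimsN C).map (fun n : Nat => (n : Int)))).map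
        (fun ab => PySem.List.slice C (some ab.1) (some ab.2)) = pvSegs C := by
  rw [pvPairs_map, List.map_map, ← pvSegsIdx_eq C]
  apply List.map_congr_left
  intro ab _
  simp only [Function.comp]
  rw [PySem.List.slice_natCast]
  rfl

theorem altB_char_list (C : List String) :
    (let cortes := ((PySem.List.enumerate C).filter
        (fun p => PySem.Str.startswith p.2 "Usuario: ")).map Prod.fst
     let limites := ((0 : Int) :: cortes) ++ [(C.length : Int)]
     (limites.zip limites.tail).foldl
       (fun grupos ab =>
         let seg := PySem.List.slice C (some ab.1) (some ab.2)
         let n := pvTrimLenB seg seg.length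
         if 0 < n then grupos ++ [PySem.List.slice seg none (some (n : Int))] else grupos) [])
    = pvCollectB (pvSegs C) := by
  simp only []
  rw [pvFoldB_collect (fun ab : Int × Int => PySem.List.slice C (some ab.1) (some ab.2))]
  rw [List.nil_append]
  congr 1
  rw [show ∀ (L : List Int), L.zip L.tail = pvPairs L from fun _ => rfl]
  rw [pvLimites_eq C, pvMappedSegs C]

theorem altB_char (texto marca : String) :
    parsear_grupos_por_usuario_py_alt texto marca
      = pvCollectB (pvSegs (pvContenido texto marca)) := by
  unfold parsear_grupos_por_usuario_py_alt pvContenido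
  exact altB_char_list _

-- ---------- collect comparison ----------

theorem pvCollectA_markers (segs : List (List String))
    (h : ∀ s ∈ segs, ∃ m t, s = m :: t ∧ pvMarker m = true) (hne : segs ≠ []) :
    pvCollectA segs = segs.map pvRtrim := by
  induction segs with
  | nil => exact absurd rfl hne
  | cons s rest ih =>
      obtain ⟨m, t, hs, hm⟩ := h s (by simp)
      have hsne : ¬ s.isEmpty = true := by simp [hs]
      have hrne : pvRtrim s ≠ [] := by
        rw [hs]; exact pvRtrim_cons_ne_nil m t (pvMarker_not_blank m hm)
      cases rest with
      | nil =>
          simp only [pvCollectA, List.map]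
          rw [if_neg hsne]
          simp [hrne]
      | cons s2 r =>
          rw [pvCollectA_cons_cons s s2 r (by simpa using hsne)]
          rw [ih (fun x hx => h x (by simp [hx])) (by simp)]
          rfl

theorem pvCollectB_markers (segs : List (List String))
    (h : ∀ s ∈ segs, ∃ m t, s = m :: t ∧ pvMarker m = true) :
    pvCollectB segs = segs.map pvRtrim := by
  unfold pvCollectB
  rw [List.filter_eq_self.mpr]
  intro s hs
  obtain ⟨m, t, hs', hm⟩ := h s hs
  rw [hs']
  simpa using pvRtrim_cons_ne_nil m t (pvMarker_not_blank m hm)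

theorem pvMain_eq (C : List String)
    (hnd : ¬ ((C.takeWhile (fun l => !pvMarker l)) ≠ [] ∧
        (∀ l ∈ C.takeWhile (fun l => !pvMarker l), pvBlankB l = true) ∧
        (C.takeWhile (fun l => !pvMarker l)).length < C.length)) :
    pvCollectA (pvSegs C) = pvCollectB (pvSegs C) := by
  have hpre := pvSegs_pre C
  cases hsegs : (C.foldr pvSegStep ([], [])).2 with
  | nil =>
      show pvCollectA ((C.foldr pvSegStep ([], [])).1 :: (C.foldr pvSegStep ([], [])).2)
        = pvCollectB ((C.foldr pvSegStep ([], [])).1 :: (C.foldr pvSegStep ([], [])).2)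
      rw [hsegs]
      set pre := (C.foldr pvSegStep ([], [])).1 with hpredef
      by_cases hp : pre.isEmpty
      · have : pre = [] := by simpa [List.isEmpty_iff] using hp
        simp [pvCollectA, pvCollectB, this, pvRtrim]
      · simp only [pvCollectA]
        rw [if_neg (by simpa using hp)]
        by_cases ht : (pvRtrim pre).isEmpty
        · rw [pvCollectB_cons]
          simp [ht, pvCollectB]
        · rw [pvCollectB_cons]
          simp [ht, pvCollectB]
  | cons s r =>
      have hne2 : (C.foldr pvSegStep ([], [])).2 ≠ [] := by rw [hsegs]; simp
      have hlt := pvTakeWhile_lt_of_segs_ne_nil C hne2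
      have hmk := pvSegs_inv C
      rw [hsegs] at hmk
      show pvCollectA ((C.foldr pvSegStep ([], [])).1 :: (C.foldr pvSegStep ([], [])).2)
        = pvCollectB ((C.foldr pvSegStep ([], [])).1 :: (C.foldr pvSegStep ([], [])).2)
      rw [hsegs, pvSegs_pre C]
      set pre := C.takeWhile (fun l => !pvMarker l) with hpredef
      have hA : pvCollectA (pre :: s :: r)
          = (if pre.isEmpty then [] else [pvRtrim pre]) ++ pvCollectA (s :: r) := rfl
      rw [hA, pvCollectB_cons, pvCollectA_markers _ hmk (by simp), pvCollectB_markers _ hmk]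
      congr 1
      -- from hnd and hlt: pre = [] or pre has a non-blank line
      have hnd' : pre = [] ∨ ¬ (∀ l ∈ pre, pvBlankB l = true) := by
        by_cases h0 : pre = []
        · exact Or.inl h0
        · exact Or.inr (fun hall => hnd ⟨h0, hall, hlt⟩)
      rcases hnd' with h0 | h0
      · simp [h0, pvRtrim]
      · have hrne : pvRtrim pre ≠ [] := fun hc => h0 ((pvRtrim_nil_iff pre).mp hc)
        have hpne : pre ≠ [] := by
          intro hc
          exact h0 (by simp [hc])
        simp [hrne, hpne]

theorem pvHead_dropWhile {p : String → Bool} {l : List String} {c : String} {rest : List String}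
    (h : List.dropWhile p l = c :: rest) : p c = false := by
  induction l with
  | nil => simp at h
  | cons a t ih =>
      rw [List.dropWhile] at h
      cases hpa : p a
      · rw [hpa] at h
        simp only [] at h
        cases h
        exact hpa
      · rw [hpa] at h
        simp only [] at h
        exact ih h

theorem pvD_iff_cond (texto marca : String) :
    D_parsear_grupos_por_usuario_py texto marca ↔
      ((pvContenido texto marca).takeWhile (fun l => !pvMarker l) ≠ [] ∧
        (∀ l ∈ (pvContenido texto marca).takeWhile (fun l => !pvMarker l), pvBlankB l = true) ∧
        ((pvContenido texto marca).takeWhile (fun l => !pvMarker l)).length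
          < (pvContenido texto marca).length) := by
  unfold D_parsear_grupos_por_usuario_py pvContenido
  simp only []
  by_cases hb : (!((PySem.Str.split? texto "\n").getD []).isEmpty
      && PySem.Str.startswith ((PySem.Str.split? texto "\n").getD []).headI marca) = true
  · rw [if_pos hb]
    simp only [Bool.and_eq_true, Bool.not_eq_true'] at hb
    constructor
    · rintro ⟨hni, -⟩
      exact absurd ⟨fun hc => by simp [hc] at hb, hb.2⟩ hni
    · rintro ⟨hp1, hp2, -⟩
      exfalso
      cases hC : List.dropWhile pvBlankB (((PySem.Str.split? texto "\n").getD []).drop 1) with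
      | nil => rw [hC] at hp1; simp at hp1
      | cons c rest =>
          have hcb : pvBlankB c = false := pvHead_dropWhile hC
          by_cases hcm : pvMarker c
          · rw [hC] at hp1
            simp [List.takeWhile, hcm] at hp1
          · rw [hC] at hp2
            have := hp2 c (by simp [List.takeWhile, hcm])
            rw [hcb] at this
            exact absurd this (by decide)
  · rw [if_neg hb]
    constructor
    · rintro ⟨-, h⟩; exact h
    · intro h
      refine ⟨?_, h⟩
      rintro ⟨hne, hsw⟩
      apply hb
      cases hie : ((PySem.Str.split? texto "\n").getD []).isEmpty
      · simpa using hsw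
      · exact absurd (List.isEmpty_iff.mp hie) hne

-- ===== VERDICT =====
theorem parsear_grupos_por_usuario_py_spec : Claim_unchanged_parsear_grupos_por_usuario_py := by
  intro texto marca _ hD
  rw [portA_char, altB_char]
  apply pvMain_eq
  intro hcond
  exact hD ((pvD_iff_cond texto marca).mpr hcond)
theorem parsear_grupos_por_usuario_py_changed : Claim_changed_parsear_grupos_por_usuario_py := by
  unfold Claim_changed_parsear_grupos_por_usuario_py; decide
theorem parsear_grupos_por_usuario_py_tight : Claim_exact_parsear_grupos_por_usuario_py := by
  intro texto marca _ hD heq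
  rw [portA_char, altB_char] at heq
  obtain ⟨hp1, hp2, hp3⟩ := (pvD_iff_cond texto marca).mp hD
  set C := pvContenido texto marca with hC
  have hpre := pvSegs_pre C
  have hne2 : (C.foldr pvSegStep ([], [])).2 ≠ [] := pvSegs_ne_nil_of_lt C hp3
  obtain ⟨s, r, hsr⟩ : ∃ s r, (C.foldr pvSegStep ([], [])).2 = s :: r := by
    cases h : (C.foldr pvSegStep ([], [])).2 with
    | nil => exact absurd h hne2
    | cons a b => exact ⟨a, b, rfl⟩
  have hmk := pvSegs_inv C
  rw [hsr] at hmk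
  have hpe : (C.foldr pvSegStep ([], [])).1 = C.takeWhile (fun l => !pvMarker l) := hpre
  have hsegsC : pvSegs C = (C.takeWhile (fun l => !pvMarker l)) :: s :: r := by
    show (C.foldr pvSegStep ([], [])).1 :: (C.foldr pvSegStep ([], [])).2 = _
    rw [hsr, hpe]
  rw [hsegsC] at heq
  set pre := C.takeWhile (fun l => !pvMarker l) with hpredef
  have hA : pvCollectA (pre :: s :: r)
      = (if pre.isEmpty then [] else [pvRtrim pre]) ++ pvCollectA (s :: r) := rfl
  have hrt : pvRtrim pre = [] := (pvRtrim_nil_iff pre).mpr hp2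
  rw [hA, pvCollectB_cons, pvCollectA_markers _ hmk (by simp), pvCollectB_markers _ hmk] at heq
  rw [if_neg (by simpa using hp1), hrt] at heq
  have hlen := congrArg List.length heq
  simp at hlen
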